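-- pv_equiv track=rewrite | github.com/cctbx/cctbx_project | libtbx/topological_sort.py | stable
-- ===== SOURCE A (Python) =====
-- def stable(connections):
--   ranks = {}
--   for node, deps in connections:
--     assert node not in ranks
--     ranks[node] = len(ranks)
--   deps_by_node = {}
--   for node, deps in connections:
--     deps_by_node[node] = deps
--     for d in deps:
--       if (d not in ranks):
--         ranks[d] = len(ranks)
--   lower_bounds = {}
--   node_list = []
--   def process(dependent_node, node):
--     if (node in lower_bounds):
--       return
--     if (dependent_node is None):
--       lower_bounds[node] = len(node_list)
--       node_list.append(node)
--     else:
--       n = len(node_list)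
--       i = lower_bounds[dependent_node]
--       while (i < n):
--         if (node_list[i] == dependent_node):
--           break
--         i += 1
--       else:
--         raise AssertionError
--       lower_bounds[node] = i
--       node_list.insert(i, node)
--     deps = deps_by_node.get(node)
--     if (deps is not None):
--       del deps_by_node[node]
--       for rank,dependency in sorted([(ranks[d],d) for d in deps]):
--         process(dependent_node=node, node=dependency)
--   for node, deps in connections:
--     process(dependent_node=None, node=node)
--   return node_list
-- ===== SOURCE B (Python) =====
-- def stable(connections):
--   ranks = {}
--   for node, _deps in connections:
--     ranks.setdefault(node, len(ranks))
--   for _node, deps in connections: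
--     for d in deps:
--       ranks.setdefault(d, len(ranks))
--   deps_by_node = dict(connections)
--   out = []
--   visited = set()
--   def visit(node):
--     if node in visited:
--       return
--     visited.add(node)
--     for d in sorted(deps_by_node.pop(node, []), key=lambda d: ranks[d]):
--       visit(d)
--     out.append(node)
--   for node, _deps in connections:
--     visit(node)
--   return out
-- ===== Notes on version B (the rewrite author's own statement) =====
-- stated objective: faster
-- what changed: A builds the order by inserting each dependency into the middle of node_list just before its dependent (scanning from a recorded lower bound); B computes the same list as a plain post-order DFS with a visited set, appending each node after its rank-sorted dependencies, so the lower_bounds/insertion-scan machinery disappears.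
import Mathlib
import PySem

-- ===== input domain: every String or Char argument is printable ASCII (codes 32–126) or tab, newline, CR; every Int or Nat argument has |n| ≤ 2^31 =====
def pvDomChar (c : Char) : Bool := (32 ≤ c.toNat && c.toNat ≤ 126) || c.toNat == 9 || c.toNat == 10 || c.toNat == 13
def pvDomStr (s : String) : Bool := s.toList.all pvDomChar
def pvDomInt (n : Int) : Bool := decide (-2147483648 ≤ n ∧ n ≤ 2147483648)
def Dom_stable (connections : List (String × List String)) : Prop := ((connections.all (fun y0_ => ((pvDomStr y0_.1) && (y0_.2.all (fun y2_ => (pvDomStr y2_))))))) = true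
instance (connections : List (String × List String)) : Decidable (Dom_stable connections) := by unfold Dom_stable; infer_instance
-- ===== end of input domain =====

-- B replaces A's insert-before-dependent recursion over a growing node_list (with lower_bounds
-- index bookkeeping and a positional scan) by a plain post-order DFS with a visited set that only
-- APPENDS to the output; objective: alternative algorithm, same return value.

-- ===== PORT A =====
-- A's mutable state: lower_bounds, node_list, deps_by_node.
-- lower_bounds values are list indices, always ≥ 0 in Python, stored as Nat.
structure PvSt where
  lb : PySem.Dict String Nat
  nl : List String
  deps : PySem.Dict String (List String)
deriving Repr, DecidableEq

-- 'for node, deps in connections: assert node not in ranks; ranks[node] = len(ranks)'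
-- (the assert raises AssertionError on a duplicate node: those inputs are excluded by Pre_stable)
def pvRanks1A (connections : List (String × List String)) : PySem.Dict String Int :=
  connections.foldl (fun r p => r.insert p.1 (r.size : Int)) PySem.Dict.empty

-- second loop: 'for d in deps: if d not in ranks: ranks[d] = len(ranks)'
def pvRanks2A (r0 : PySem.Dict String Int) (connections : List (String × List String)) : PySem.Dict String Int :=
  connections.foldl (fun r p => p.2.foldl (fun r d => if r.contains d then r else r.insert d (r.size : Int)) r) r0

def pvDepsA (connections : List (String × List String)) : PySem.Dict String (List String) :=
  connections.foldl (fun dd p => dd.insert p.1 p.2) PySem.Dict.empty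

-- the body of process() before the recursive calls: the guard has already been checked.
-- The while/else scan from lower_bounds[dependent_node] is the first index ≥ i0 holding
-- dependent_node; if the scan fails Python raises AssertionError — unreachable (the dependent
-- node is always in node_list at or after its recorded lower bound); the port keeps st there.
def pvInsA (dep? : Option String) (node : String) (st : PvSt) : PvSt :=
  match dep? with
  | none => { st with lb := st.lb.insert node st.nl.length, nl := st.nl ++ [node] }
  | some dep =>
      let i0 := st.lb.getD dep 0
      match PySem.List.index? (st.nl.drop i0) dep with
      | none => st
      | some k =>
          let i := i0 + k
          { st with lb := st.lb.insert node i, nl := st.nl.take i ++ node :: st.nl.drop i }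

-- process(dependent_node, node), fueled: the depth of the recursion is bounded by the number of
-- deps_by_node keys still present (each recursing level deletes one), so fuel
-- len(connections) + 1 at the call site is always enough.
-- ranks gives distinct nodes distinct ranks, so Python's tuple sort 'sorted([(ranks[d], d) …])'
-- is exactly the stable sort by the integer first component (tied pairs are identical): exact here.
def pvProcessA (ranks : PySem.Dict String Int) : Nat → Option String → String → PvSt → PvSt
  | 0, _, _, st => st
  | Nat.succ f, dep?, node, st =>
    if st.lb.contains node then st
    else
      let st1 := pvInsA dep? node st
      match st1.deps.get? node with
      | none => st1
      | some deps =>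
          let st2 : PvSt := { st1 with deps := st1.deps.erase node }
          ((PySem.List.sorted (deps.map (fun d => ((ranks.getD d 0 : Int), d))) (fun p => p.1) false).foldl
            (fun st p => pvProcessA ranks f (some node) p.2 st) st2)

def stable (connections : List (String × List String)) : List String :=
  let ranks := pvRanks2A (pvRanks1A connections) connections
  let st0 : PvSt := ⟨PySem.Dict.empty, [], pvDepsA connections⟩
  (connections.foldl (fun st p => pvProcessA ranks (connections.length + 1) none p.1 st) st0).nl

-- ===== PORT B =====
-- B's mutable state: the visited set and the append-only output list, plus deps_by_node.
structure PvStB where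
  vis : PySem.Set String
  out : List String
  deps : PySem.Dict String (List String)
deriving Repr, DecidableEq

-- 'ranks.setdefault(node, len(ranks))' over the nodes, then over all deps
def pvRanksB (connections : List (String × List String)) : PySem.Dict String Int :=
  let r1 := connections.foldl (fun r p => r.setdefault p.1 (r.size : Int)) PySem.Dict.empty
  connections.foldl (fun r p => p.2.foldl (fun r d => r.setdefault d (r.size : Int)) r) r1

-- 'deps_by_node = dict(connections)'
def pvDepsB (connections : List (String × List String)) : PySem.Dict String (List String) :=
  connections.foldl (fun dd p => dd.insert p.1 p.2) PySem.Dict.empty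

-- visit(node): guard on the visited set, mark, pop the deps entry, recurse over the deps
-- sorted by rank, then append node to the output.  Fueled like A's port: the depth of the
-- recursion into children is bounded by the number of deps_by_node keys, so
-- len(connections) + 1 is always enough fuel.
def pvVisitB (ranks : PySem.Dict String Int) : Nat → String → PvStB → PvStB
  | 0, _, st => st
  | Nat.succ f, n, st =>
    if PySem.Set.contains st.vis n then st
    else
      let st1 : PvStB := { st with vis := PySem.Set.add st.vis n }
      let ds := st1.deps.getD n []
      let st2 : PvStB := { st1 with deps := st1.deps.erase n }
      let st3 := (PySem.List.sorted ds (fun d => (ranks.getD d 0 : Int)) false).foldl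
        (fun st d => pvVisitB ranks f d st) st2
      { st3 with out := st3.out ++ [n] }

def stable_alt (connections : List (String × List String)) : List String :=
  let ranks := pvRanksB connections
  let st0 : PvStB := ⟨PySem.Set.empty, [], pvDepsB connections⟩
  (connections.foldl (fun st p => pvVisitB ranks (connections.length + 1) p.1 st) st0).out

-- ===== PRECONDITION & SPEC =====
-- Pre_ excludes exactly the inputs with a duplicate node among the connections' first components:
-- there A's 'assert node not in ranks' raises AssertionError (A returns nothing).
def Pre_stable (connections : List (String × List String)) : Prop :=
  (connections.map Prod.fst).Nodup
instance (connections : List (String × List String)) : Decidable (Pre_stable connections) := by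
  unfold Pre_stable; infer_instance

def pvWitness_stable : (List (String × List String)) := [("a", ["b", "c"]), ("b", ["c"])]

def Spec_stable (connections : List (String × List String)) (out : List String) : Prop := out = stable_alt connections
instance (connections : List (String × List String)) (out : List String) : Decidable (Spec_stable connections out) := by unfold Spec_stable; infer_instance

-- ===== CLAIM (what is proved, stated in full; the proofs are below) =====
def Claim_equal_stable : Prop := ∀ (connections : List (String × List String)), Dom_stable connections → Pre_stable connections → Spec_stable connections (stable connections)

-- ===== LEMMAS AND PROOFS =====

theorem pvDepsB_eq : @pvDepsB = @pvDepsA := rfl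

-- stability/naturality of the insertion sort: sorting the (rank, d) pairs by their first
-- component is the map of sorting the d's by rank
theorem pvInsertBy_map {α β : Type} (f : α → β) (bb : β → β → Bool) (ba : α → α → Bool)
    (h : ∀ a b, bb (f a) (f b) = ba a b) (x : α) :
    ∀ ys : List α, PySem.List.insertBy bb (f x) (ys.map f) = (PySem.List.insertBy ba x ys).map f := by
  intro ys
  induction ys with
  | nil => simp [PySem.List.insertBy]
  | cons y ys ih =>
      simp only [List.map_cons, PySem.List.insertBy, h]
      by_cases hb : ba x y = true
      · simp [hb]
      · simp [hb, ih]

theorem pvSorted_map_pair (ranks : PySem.Dict String Int) (ds : List String) :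
    PySem.List.sorted (ds.map (fun d => ((ranks.getD d 0 : Int), d))) (fun p => p.1) false
      = (PySem.List.sorted ds (fun d => (ranks.getD d 0 : Int)) false).map
          (fun d => ((ranks.getD d 0 : Int), d)) := by
  rw [PySem.List.sorted_eq_foldl_insertBy, PySem.List.sorted_eq_foldl_insertBy]
  have main : ∀ (l acc : List String),
      (l.map (fun d => ((ranks.getD d 0 : Int), d))).foldl
        (fun a x => PySem.List.insertBy (fun p q => decide (p.1 < q.1)) x a)
        (acc.map (fun d => ((ranks.getD d 0 : Int), d)))
      = (l.foldl (fun a x => PySem.List.insertBy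
          (fun a b => decide ((ranks.getD a 0 : Int) < (ranks.getD b 0 : Int))) x a) acc).map
          (fun d => ((ranks.getD d 0 : Int), d)) := by
    intro l
    induction l with
    | nil => intro acc; rfl
    | cons d l ih =>
        intro acc
        simp only [List.map_cons, List.foldl_cons]
        rw [pvInsertBy_map (fun d => ((ranks.getD d 0 : Int), d))
          (fun p q => decide (p.1 < q.1))
          (fun a b => decide ((ranks.getD a 0 : Int) < (ranks.getD b 0 : Int)))
          (fun a b => rfl) d acc]
        exact ih _
  simpa using main ds []

-- erasing an absent key is the identity
theorem pvErase_absent {ν : Type} (d : PySem.Dict String ν) (n : String)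
    (h : d.get? n = none) : d.erase n = d := by
  apply PySem.Dict.ext
  simp only [PySem.Dict.erase]
  apply List.filter_eq_self.mpr
  intro p hp
  simp only [PySem.Dict.get?, Option.map_eq_none_iff] at h
  have := List.find?_eq_none.mp h p hp
  simpa using this

-- the simulation invariant: A's node_list is B's output followed by the chain T of pending
-- ancestors (innermost first); visited = lower_bounds keys = members of node_list; every
-- recorded lower bound is at most the output boundary, so A's scan finds the dependent exactly
-- at the boundary and A's insertion is an append to the output part.
def PvInv (stA : PvSt) (stB : PvStB) (T : List String) : Prop :=
  stA.nl = stB.out ++ T ∧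
  stA.deps = stB.deps ∧
  stA.nl.Nodup ∧
  (∀ n, stA.lb.contains n = true ↔ n ∈ stA.nl) ∧
  (∀ n, PySem.Set.contains stB.vis n = stA.lb.contains n) ∧
  (∀ k i, stA.lb.get? k = some i → i ≤ stB.out.length)

def pvDepOK : Option String → List String → Prop
  | none, T => T = []
  | some d, T => ∃ T', T = d :: T'

theorem pvInsA_spec (stA : PvSt) (stB : PvStB) (T : List String) (dep? : Option String)
    (n : String) (hInv : PvInv stA stB T) (hdep : pvDepOK dep? T)
    (hn : stA.lb.contains n = false) :
    pvInsA dep? n stA = ⟨stA.lb.insert n stB.out.length, stB.out ++ n :: T, stA.deps⟩ := by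
  obtain ⟨h1, h2, h3, h4, h5, h6⟩ := hInv
  cases dep? with
  | none =>
      obtain rfl : T = [] := hdep
      simp only [pvInsA, h1, List.append_nil]
  | some d =>
      obtain ⟨T', rfl⟩ := hdep
      have hdmem : d ∈ stA.nl := by rw [h1]; simp
      have hdc : stA.lb.contains d = true := (h4 d).mpr hdmem
      rw [PySem.Dict.contains_eq_isSome_get?] at hdc
      obtain ⟨i, hi⟩ := Option.isSome_iff_exists.mp hdc
      have hile : i ≤ stB.out.length := h6 d i hi
      have hgetD : stA.lb.getD d 0 = i := by
        rw [PySem.Dict.getD_eq_get?_getD, hi]; rfl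
      have hdnotout : d ∉ stB.out := by
        intro hmem
        have := h3
        rw [h1] at this
        rw [List.nodup_middle] at this
        exact (List.nodup_cons.mp this).1 (by simp [hmem])
      have hdrop : stA.nl.drop i = stB.out.drop i ++ d :: T' := by
        rw [h1, List.drop_append_of_le_length hile]
      have hidx : PySem.List.index? (stA.nl.drop i) d = some (stB.out.drop i).length := by
        rw [PySem.List.index?_eq_some_iff]
        exact ⟨stB.out.drop i, T', hdrop, rfl, fun hm => hdnotout (List.drop_subset _ _ hm)⟩
      have hlen : i + (stB.out.drop i).length = stB.out.length := by
        rw [List.length_drop]; omega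
      simp only [pvInsA, hgetD, hidx, hlen]
      have htake : stA.nl.take stB.out.length = stB.out := by
        rw [h1, show stB.out ++ d :: T' = stB.out ++ (d :: T') from rfl]
        exact List.take_left
      have hdrop2 : stA.nl.drop stB.out.length = d :: T' := by
        rw [h1]; exact List.drop_left
      cases stA with
      | mk lb nl deps =>
          simp only at htake hdrop2 ⊢
          rw [htake, hdrop2]

theorem pvInv_step (stA : PvSt) (stB : PvStB) (T : List String) (n : String)
    (D : PySem.Dict String (List String))
    (hInv : PvInv stA stB T) (hn : stA.lb.contains n = false) :
    PvInv ⟨stA.lb.insert n stB.out.length, stB.out ++ n :: T, D⟩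
          ⟨PySem.Set.add stB.vis n, stB.out, D⟩ (n :: T) := by
  obtain ⟨h1, h2, h3, h4, h5, h6⟩ := hInv
  have hfresh : n ∉ stA.nl := fun hm => by simp [(h4 n).mpr hm] at hn
  refine ⟨rfl, rfl, ?_, ?_, ?_, ?_⟩
  · rw [List.nodup_middle, List.nodup_cons]
    exact ⟨by rw [← h1]; exact hfresh, by rw [← h1]; exact h3⟩
  · intro m
    rw [PySem.Dict.contains_insert]
    by_cases hm : m = n
    · subst hm; simp
    · have : (m == n) = false := beq_eq_false_iff_ne.mpr hm
      rw [this, Bool.false_or]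
      rw [h4 m, h1]
      simp only [List.mem_append, List.mem_cons]
      tauto
  · intro m
    rw [PySem.Dict.contains_insert]
    by_cases hm : m = n
    · subst hm
      simp only [beq_self_eq_true, Bool.true_or]
      exact (PySem.Set.contains_iff _ _).mpr ((PySem.Set.mem_add _ _ _).mpr (Or.inr rfl))
    · have hb : (m == n) = false := beq_eq_false_iff_ne.mpr hm
      rw [hb, Bool.false_or, ← h5 m]
      cases hc : PySem.Set.contains stB.vis m with
      | true =>
          exact (PySem.Set.contains_iff _ _).mpr
            ((PySem.Set.mem_add _ _ _).mpr (Or.inl ((PySem.Set.contains_iff _ _).mp hc)))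
      | false =>
          cases hc' : PySem.Set.contains (PySem.Set.add stB.vis n) m with
          | false => rfl
          | true =>
              exfalso
              rcases (PySem.Set.mem_add _ _ _).mp ((PySem.Set.contains_iff _ _).mp hc') with hm' | hm'
              · rw [(PySem.Set.contains_iff _ _).mpr hm'] at hc; simp at hc
              · exact hm hm'
  · intro k i hk
    rw [PySem.Dict.get?_insert] at hk
    split at hk
    · simp only [Option.some.injEq] at hk
      simpa using hk.symm.le
    · exact h6 k i hk

theorem pvInv_emit (stA : PvSt) (stB : PvStB) (T : List String) (n : String)
    (hInv : PvInv stA stB (n :: T)) :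
    PvInv stA ⟨stB.vis, stB.out ++ [n], stB.deps⟩ T := by
  obtain ⟨h1, h2, h3, h4, h5, h6⟩ := hInv
  refine ⟨by rw [h1]; simp, h2, h3, h4, h5, ?_⟩
  intro k i hk
  have := h6 k i hk
  simp only [List.length_append, List.length_cons, List.length_nil]
  omega

-- the heart of the proof: A's process() and B's visit() preserve the invariant in lockstep
theorem pvChildren_step (ranks : PySem.Dict String Int) (f : Nat)
    (hP : ∀ (dep? : Option String) (n : String) (T : List String) (stA : PvSt) (stB : PvStB),
      PvInv stA stB T → pvDepOK dep? T →
      PvInv (pvProcessA ranks f dep? n stA) (pvVisitB ranks f n stB) T) :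
    ∀ (ds : List String) (n : String) (T : List String) (stA : PvSt) (stB : PvStB),
      PvInv stA stB (n :: T) →
      PvInv ((ds.map (fun d => ((ranks.getD d 0 : Int), d))).foldl
              (fun st p => pvProcessA ranks f (some n) p.2 st) stA)
            (ds.foldl (fun st d => pvVisitB ranks f d st) stB) (n :: T) := by
  intro ds
  induction ds with
  | nil => intro n T stA stB h; simpa using h
  | cons d ds ih =>
      intro n T stA stB h
      rw [List.map_cons, List.foldl_cons, List.foldl_cons]
      exact ih n T _ _ (hP (some n) d (n :: T) stA stB h ⟨T, rfl⟩)

theorem pvProcess_step (ranks : PySem.Dict String Int) :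
    ∀ (f : Nat) (dep? : Option String) (n : String) (T : List String) (stA : PvSt) (stB : PvStB),
      PvInv stA stB T → pvDepOK dep? T →
      PvInv (pvProcessA ranks f dep? n stA) (pvVisitB ranks f n stB) T := by
  intro f
  induction f with
  | zero => intro dep? n T stA stB h _; simpa [pvProcessA, pvVisitB] using h
  | succ f ih =>
      intro dep? n T stA stB h hdep
      have h5 := h.2.2.2.2.1
      have h2 := h.2.1
      rw [pvProcessA, pvVisitB]
      by_cases hc : stA.lb.contains n = true
      · rw [if_pos hc, if_pos (by rw [h5 n]; exact hc)]
        exact h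
      · have hcf : stA.lb.contains n = false := by simpa using hc
        rw [if_neg hc, if_neg (by rw [h5 n]; simpa using hc)]
        dsimp only
        rw [pvInsA_spec stA stB T dep? n h hdep hcf]
        cases hget : stA.deps.get? n with
        | none =>
            have hgetB : stB.deps.get? n = none := by rw [← h2]; exact hget
            have hgetD : stB.deps.getD n [] = [] := by
              rw [PySem.Dict.getD_eq_get?_getD, hgetB]; rfl
            simp only [hgetD]
            rw [pvErase_absent stB.deps n hgetB, h2,
              show PySem.List.sorted ([] : List String)
                (fun d => (ranks.getD d 0 : Int)) false = [] from rfl]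
            exact pvInv_emit ⟨stA.lb.insert n stB.out.length, stB.out ++ n :: T, stB.deps⟩
              ⟨PySem.Set.add stB.vis n, stB.out, stB.deps⟩ T n (pvInv_step stA stB T n stB.deps h hcf)
        | some ds0 =>
            have hgetB : stB.deps.get? n = some ds0 := by rw [← h2]; exact hget
            have hgetD : stB.deps.getD n [] = ds0 := by
              rw [PySem.Dict.getD_eq_get?_getD, hgetB]; rfl
            simp only [hgetD]
            have hInv2 := pvInv_step stA stB T n (stB.deps.erase n) h hcf
            rw [pvSorted_map_pair ranks ds0]
            have hch := pvChildren_step ranks f ih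
              (PySem.List.sorted ds0 (fun d => (ranks.getD d 0 : Int)) false) n T
              ⟨stA.lb.insert n stB.out.length, stB.out ++ n :: T, stB.deps.erase n⟩
              ⟨PySem.Set.add stB.vis n, stB.out, stB.deps.erase n⟩ hInv2
            have hdepsEq : stA.deps.erase n = stB.deps.erase n := by rw [h2]
            rw [hdepsEq]
            exact pvInv_emit _ _ T n hch

theorem pvFoldInv (ranks : PySem.Dict String Int) (N : Nat) :
    ∀ (l : List (String × List String)) (stA : PvSt) (stB : PvStB),
      PvInv stA stB [] →
      PvInv (l.foldl (fun st p => pvProcessA ranks N none p.1 st) stA)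
            (l.foldl (fun st p => pvVisitB ranks N p.1 st) stB) [] := by
  intro l
  induction l with
  | nil => intro stA stB h; exact h
  | cons p l ih =>
      intro stA stB h
      simp only [List.foldl_cons]
      exact ih _ _ (pvProcess_step ranks N none p.1 [] stA stB h rfl)

-- ranks built with setdefault equal A's ranks (first loop needs the Nodup precondition)
theorem pvRanks1_eq :
    ∀ (l : List (String × List String)) (r : PySem.Dict String Int),
      (l.map Prod.fst).Nodup → (∀ p ∈ l, r.contains p.1 = false) →
      l.foldl (fun r p => r.setdefault p.1 (r.size : Int)) r
        = l.foldl (fun r p => r.insert p.1 (r.size : Int)) r := by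
  intro l
  induction l with
  | nil => intro r _ _; rfl
  | cons p l ih =>
      intro r hnd hfresh
      rw [List.map_cons, List.nodup_cons] at hnd
      obtain ⟨hp1, hnd'⟩ := hnd
      have hc : r.contains p.1 = false := hfresh p List.mem_cons_self
      simp only [List.foldl_cons]
      rw [PySem.Dict.setdefault_of_not_contains r _ hc]
      refine ih (r.insert p.1 (r.size : Int)) hnd' ?_
      intro q hq
      have hne : (q.1 == p.1) = false := by
        apply beq_eq_false_iff_ne.mpr
        intro e
        exact hp1 (e ▸ List.mem_map_of_mem hq)
      rw [PySem.Dict.contains_insert, hne, Bool.false_or]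
      exact hfresh q (List.mem_cons_of_mem p hq)

-- pvRanksB_eq glue (locally restating defs to test shape)

theorem pvRanksB_eq (connections : List (String × List String))
    (h : (connections.map Prod.fst).Nodup) :
    pvRanksB connections = pvRanks2A (pvRanks1A connections) connections := by
  unfold pvRanksB pvRanks2A pvRanks1A
  rw [pvRanks1_eq connections PySem.Dict.empty h
    (by intro p _; exact PySem.Dict.contains_empty p.1)]
  have hstep : (fun (r : PySem.Dict String Int) (d : String) => r.setdefault d (r.size : Int))
      = fun r d => if r.contains d then r else r.insert d (r.size : Int) := by
    funext r d
    by_cases hc : r.contains d = true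
    · rw [PySem.Dict.setdefault_of_contains r _ hc, if_pos hc]
    · rw [PySem.Dict.setdefault_of_not_contains r _ (by simpa using hc), if_neg hc]
  rw [hstep]

-- ===== VERDICT (by name: the statement is the Claim_ definition above) =====
theorem stable_spec : Claim_equal_stable := by
  intro connections _hdom hpre
  unfold Spec_stable stable stable_alt
  dsimp only
  rw [pvRanksB_eq connections hpre, pvDepsB_eq]
  have h := pvFoldInv (pvRanks2A (pvRanks1A connections) connections) (connections.length + 1)
    connections ⟨PySem.Dict.empty, [], pvDepsA connections⟩ ⟨PySem.Set.empty, [], pvDepsA connections⟩ ?_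
  · have h1 := h.1
    simpa using h1
  · refine ⟨rfl, rfl, List.nodup_nil, ?_, ?_, ?_⟩
    · intro n
      simp [PySem.Dict.contains_empty]
    · intro n
      simp [PySem.Dict.contains_empty, PySem.Set.empty]
    · intro k i h
      simp [PySem.Dict.get?_empty] at h
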